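-- pv_equiv track=rewrite | github.com/ryongseong/programmers | 무지의 먹방 라이브/무지의먹방라이브_solution2.py | solution
-- ===== SOURCE A (Python) =====
-- def solution(food_times, k):
--     food_list = []
--     totalTime = 0
--
--     for i in range(len(food_times)):
--         food_list.append([i, food_times[i]])
--         totalTime += food_times[i]
--
--     if totalTime <= k:
--         return -1
--
--     food_list = sorted(food_list, key = lambda x:x[1])
--
--     delTime = food_list[0][1]*len(food_list)
--     i = 1
--
--     while delTime < k:
--         k -= delTime
--         delTime = (food_list[i][1] - food_list[i-1][1]) * (len(food_list) - i)
--         i += 1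
--
--     food_list = sorted(food_list[i-1:], key = lambda x:x[0])
--
--     return food_list[k%len(food_list)][0]+1
-- ===== SOURCE B (Python) =====
-- def solution(food_times, k):
--     n = len(food_times)
--     if sum(food_times) <= k:
--         return -1
--     pairs = sorted(enumerate(food_times), key=lambda p: p[1])
--     # cums[j] = seconds of round-robin eating needed to fully finish the j+1 smallest foods
--     cums = []
--     acc = 0
--     for j, (_, t) in enumerate(pairs):
--         acc += t
--         cums.append(acc + (n - 1 - j) * t)
--     m = sum(1 for c in cums if c < k)
--     rem = k - (cums[m - 1] if m > 0 else 0)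
--     survivors = sorted(idx for idx, _ in pairs[m:])
--     return survivors[rem % (n - m)] + 1
-- ===== Notes on version B (the rewrite author's own statement) =====
-- stated objective: alternative
-- what changed: A drains the sorted foods with a stateful while-loop that mutates k and a look-ahead delTime; B instead builds the list of cumulative finish times once, counts how many are below k (a closed-form selection with no early-exit loop) and indexes the survivors directly.
import Mathlib
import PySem

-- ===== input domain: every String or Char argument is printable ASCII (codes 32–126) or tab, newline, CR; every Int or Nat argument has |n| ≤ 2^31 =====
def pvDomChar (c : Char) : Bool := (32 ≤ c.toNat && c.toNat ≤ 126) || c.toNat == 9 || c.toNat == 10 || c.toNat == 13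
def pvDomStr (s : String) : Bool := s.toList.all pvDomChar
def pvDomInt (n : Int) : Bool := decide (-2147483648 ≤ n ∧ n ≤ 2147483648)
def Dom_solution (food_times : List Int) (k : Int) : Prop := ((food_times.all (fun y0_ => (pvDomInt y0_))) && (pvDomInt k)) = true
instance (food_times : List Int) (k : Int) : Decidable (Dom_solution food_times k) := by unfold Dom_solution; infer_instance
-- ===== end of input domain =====

-- B replaces A's stateful while-loop (mutating k with a look-ahead delTime) by building the list of
-- cumulative finish times once, counting how many lie below k, and indexing the survivors directly
-- (objective: alternative).


-- ===== PORT A =====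
-- A's while-loop, fueled; fuel = length of the list suffices under Pre_ (the loop stops by i = n)
def solutionLoopA (fl : List (Int × Int)) (n : Int) : Nat → Int → Int → Int → Int × Int
  | 0, k, _, i => (k, i)
  | fuel+1, k, delTime, i =>
    if delTime < k then
      solutionLoopA fl n fuel (k - delTime)
        (((PySem.List.pyGetD fl i (0,0)).2 - (PySem.List.pyGetD fl (i-1) (0,0)).2) * (n - i)) (i+1)
    else (k, i)

def solution (food_times : List Int) (k : Int) : Int :=
  let st := (PySem.List.pyRange 0 (PySem.List.len food_times) 1).foldl
      (fun (st : List (Int × Int) × Int) i =>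
        (st.1 ++ [(i, PySem.List.pyGetD food_times i 0)], st.2 + PySem.List.pyGetD food_times i 0))
      ([], 0)
  let food_list := st.1
  let totalTime := st.2
  if totalTime ≤ k then -1
  else
    let fl := PySem.List.sorted food_list (fun x => x.2) false
    let n : Int := PySem.List.len fl
    let delTime := (PySem.List.pyGetD fl 0 (0,0)).2 * n
    let r := solutionLoopA fl n fl.length k delTime 1
    let surv := PySem.List.sorted (PySem.List.slice fl (some (r.2 - 1)) none) (fun x => x.1) false
    (PySem.List.pyGetD surv (PySem.Int.mod r.1 (PySem.List.len surv)) (0,0)).1 + 1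

-- ===== PORT B =====
def solution_alt (food_times : List Int) (k : Int) : Int :=
  let n : Int := PySem.List.len food_times
  if food_times.sum ≤ k then -1
  else
    let pairs := PySem.List.sorted (PySem.List.enumerate food_times 0) (fun p => p.2) false
    let cums := ((PySem.List.enumerate pairs 0).foldl
        (fun (st : List Int × Int) jp =>
          let acc := st.2 + jp.2.2
          (st.1 ++ [acc + (n - 1 - jp.1) * jp.2.2], acc)) ([], 0)).1
    let m : Int := (cums.countP (fun c => decide (c < k)) : Int)
    let rem := k - (if 0 < m then PySem.List.pyGetD cums (m-1) 0 else 0)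
    let survivors := PySem.List.sorted ((PySem.List.slice pairs (some m) none).map (fun p => p.1))
        (fun x => x) false
    PySem.List.pyGetD survivors (PySem.Int.mod rem (n - m)) 0 + 1

-- ===== PRECONDITION & SPEC =====
-- Pre_ excludes only ([], k) with k < 0, where A raises IndexError (and B raises ZeroDivisionError).
def Pre_solution (food_times : List Int) (k : Int) : Prop := food_times ≠ [] ∨ 0 ≤ k
instance (food_times : List Int) (k : Int) : Decidable (Pre_solution food_times k) := by
  unfold Pre_solution; infer_instance
def pvWitness_solution : List Int × Int := ([3, 1, 2], 5)

def Spec_solution (food_times : List Int) (k : Int) (out : Int) : Prop := out = solution_alt food_times k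
instance (food_times : List Int) (k : Int) (out : Int) : Decidable (Spec_solution food_times k out) := by unfold Spec_solution; infer_instance

-- ===== CLAIM (what is proved, stated in full; the proofs are below) =====
def Claim_equal_solution : Prop := ∀ (food_times : List Int) (k : Int), Dom_solution food_times k → Pre_solution food_times k → Spec_solution food_times k (solution food_times k)

-- ===== LEMMAS AND PROOFS =====

-- proof-side spec of B's cumulative-times fold
def cumsAux (n : Int) : List (Int × Int) → Int → Int → List Int
  | [], _, _ => []
  | p :: rest, j, a => (a + p.2 + (n - 1 - j) * p.2) :: cumsAux n rest (j + 1) (a + p.2)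

theorem cumsAux_length (n : Int) (xs : List (Int × Int)) (j a : Int) :
    (cumsAux n xs j a).length = xs.length := by
  induction xs generalizing j a with
  | nil => rfl
  | cons p rest ih => simp [cumsAux, ih]

theorem foldB (n : Int) (xs : List (Int × Int)) (j L a) :
    (PySem.List.enumerate xs j).foldl
        (fun (st : List Int × Int) jp =>
          (st.1 ++ [st.2 + jp.2.2 + (n - 1 - jp.1) * jp.2.2], st.2 + jp.2.2)) (L, a)
      = (L ++ cumsAux n xs j a, a + (xs.map (fun p => p.2)).sum) := by
  induction xs generalizing j L a with
  | nil => simp [PySem.List.enumerate_nil, cumsAux]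
  | cons p rest ih =>
      rw [PySem.List.enumerate_cons]
      simp only [List.foldl_cons, ih, cumsAux]
      simp [add_assoc]

theorem cumsAux_getElem (n : Int) (xs : List (Int × Int)) (j a : Int) (i : Nat)
    (h : i < (cumsAux n xs j a).length) :
    (cumsAux n xs j a)[i] =
      a + ((xs.map (fun p => p.2)).take (i + 1)).sum
        + (n - 1 - j - i) * (xs.map (fun p => p.2)).getD i 0 := by
  induction xs generalizing j a i with
  | nil => simp [cumsAux] at h
  | cons p rest ih =>
      cases i with
      | zero => simp [cumsAux]
      | succ i' =>
          have h' : i' < (cumsAux n rest (j + 1) (a + p.2)).length := by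
            simpa [cumsAux] using h
          simp only [cumsAux, List.getElem_cons_succ, ih _ _ _ h']
          push_cast
          simp [List.take_succ_cons]
          ring_nf

-- c.getD-phrased entry formula for cumsAux at start state (j = 0, a = 0)
theorem cums_getD (s : List (Int × Int)) (i : Nat) (hi : i < s.length) :
    (cumsAux (s.length : Int) s 0 0).getD i 0 =
      ((s.map (fun p => p.2)).take (i + 1)).sum
        + ((s.length : Int) - 1 - i) * (s.map (fun p => p.2)).getD i 0 := by
  rw [List.getD_eq_getElem _ _ (by rw [cumsAux_length]; exact hi)]
  rw [cumsAux_getElem _ _ _ _ _ (by rw [cumsAux_length]; exact hi)]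
  ring

-- consecutive entries of cums are nondecreasing when the times are sorted
theorem cums_mono (s : List (Int × Int))
    (hp : (s.map (fun p => p.2)).Pairwise (· ≤ ·)) :
    ∀ p q : Nat, p ≤ q → q < s.length →
      (cumsAux (s.length : Int) s 0 0).getD p 0 ≤ (cumsAux (s.length : Int) s 0 0).getD q 0 := by
  have step : ∀ i : Nat, i + 1 < s.length →
      (cumsAux (s.length : Int) s 0 0).getD i 0 ≤ (cumsAux (s.length : Int) s 0 0).getD (i+1) 0 := by
    intro i hi1
    have hi : i < s.length := by omega
    rw [cums_getD s i hi, cums_getD s (i+1) hi1]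
    have hlen : (s.map (fun p => p.2)).length = s.length := by simp
    have hsum : ((s.map (fun p => p.2)).take (i + 1 + 1)).sum
        = ((s.map (fun p => p.2)).take (i + 1)).sum + (s.map (fun p => p.2)).getD (i+1) 0 := by
      rw [List.getD_eq_getElem _ _ (by omega), List.sum_take_succ _ _ (by omega)]
    have hts : (s.map (fun p => p.2)).getD i 0 ≤ (s.map (fun p => p.2)).getD (i+1) 0 := by
      rw [List.getD_eq_getElem _ _ (by omega), List.getD_eq_getElem _ _ (by omega)]
      exact List.pairwise_iff_getElem.1 hp i (i+1) (by omega) (by omega) (by omega)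
    have hcoef : (0:Int) ≤ (s.length : Int) - 1 - i := by
      have : i + 1 + 1 ≤ s.length := hi1
      omega
    rw [hsum]
    push_cast
    nlinarith [mul_nonneg hcoef (sub_nonneg.2 hts)]
  intro p q hpq hq
  induction q with
  | zero => interval_cases p; rfl
  | succ q' ih =>
      rcases Nat.lt_or_ge p (q'+1) with h | h
      · exact le_trans (ih (by omega) (by omega)) (step q' hq)
      · have : p = q' + 1 := by omega
        subst this; rfl

-- countP of a monotone list with a located threshold
theorem countP_threshold (c : List Int) (k0 : Int) (r : Nat) (hr : r < c.length)
    (hmono : ∀ p q : Nat, p ≤ q → q < c.length → c.getD p 0 ≤ c.getD q 0)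
    (hlt : ∀ j : Nat, j < r → c.getD j 0 < k0)
    (hge : ¬ c.getD r 0 < k0) :
    c.countP (fun x => decide (x < k0)) = r := by
  have hsplit := List.take_append_drop r c
  have h1 : (c.take r).countP (fun x => decide (x < k0)) = r := by
    have : ∀ x ∈ c.take r, (fun x => decide (x < k0)) x = true := by
      intro x hx
      rcases List.mem_iff_getElem.1 hx with ⟨j, hj, hxe⟩
      have hjr : j < r := by
        have := hj; simp [List.length_take] at this; omega
      have : x = c.getD j 0 := by
        rw [List.getD_eq_getElem _ _ (by omega), ← hxe, List.getElem_take]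
      simp only [this, decide_eq_true_eq]
      exact hlt j hjr
    rw [List.countP_eq_length.2 this, List.length_take]
    omega
  have h2 : (c.drop r).countP (fun x => decide (x < k0)) = 0 := by
    rw [List.countP_eq_zero]
    intro x hx
    rcases List.mem_iff_getElem.1 hx with ⟨t, ht, hxe⟩
    have htl : r + t < c.length := by
      have := ht; simp [List.length_drop] at this; omega
    have hx' : x = c.getD (r + t) 0 := by
      rw [List.getD_eq_getElem _ _ htl, ← hxe, List.getElem_drop]
    have : c.getD r 0 ≤ c.getD (r + t) 0 := hmono r (r + t) (by omega) htl
    simp only [hx', decide_eq_true_eq]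
    omega
  calc c.countP (fun x => decide (x < k0))
      = ((c.take r) ++ (c.drop r)).countP (fun x => decide (x < k0)) := by rw [hsplit]
    _ = r := by rw [List.countP_append, h1, h2]; omega

-- "cumulative time consumed after r full removals": 0 for r = 0, else cums[r-1]
def cDel (c : List Int) (r : Nat) : Int := if r = 0 then 0 else c.getD (r-1) 0

theorem loopA_spec (s : List (Int × Int)) (k0 : Int)
    (hmono : ∀ p q : Nat, p ≤ q → q < s.length →
      (cumsAux (s.length : Int) s 0 0).getD p 0 ≤ (cumsAux (s.length : Int) s 0 0).getD q 0)
    (hstop : ¬ (cumsAux (s.length : Int) s 0 0).getD (s.length - 1) 0 < k0) :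
    ∀ (fuel i : Nat), 1 ≤ i → i ≤ s.length → fuel + i = s.length + 1 →
      (∀ j : Nat, j < i - 1 → (cumsAux (s.length : Int) s 0 0).getD j 0 < k0) →
      solutionLoopA s (s.length : Int) fuel
          (k0 - cDel (cumsAux (s.length : Int) s 0 0) (i-1))
          (cDel (cumsAux (s.length : Int) s 0 0) i - cDel (cumsAux (s.length : Int) s 0 0) (i-1))
          (i : Int)
        = (k0 - cDel (cumsAux (s.length : Int) s 0 0)
              ((cumsAux (s.length : Int) s 0 0).countP (fun x => decide (x < k0))),
           ((cumsAux (s.length : Int) s 0 0).countP (fun x => decide (x < k0)) : Int) + 1) := by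
  intro fuel
  induction fuel with
  | zero => intro i h1 hin hfuel; omega
  | succ fuel ih =>
      intro i h1 hin hfuel hprev
      set c := cumsAux (s.length : Int) s 0 0 with hc
      have hclen : c.length = s.length := by rw [hc, cumsAux_length]
      have hcdi : cDel c i = c.getD (i-1) 0 := by unfold cDel; split <;> [omega; rfl]
      simp only [solutionLoopA]
      by_cases h : c.getD (i-1) 0 < k0
      · have hcond : cDel c i - cDel c (i-1) < k0 - cDel c (i-1) := by rw [hcdi]; omega
        rw [if_pos hcond]
        have hilt : i < s.length := by
          rcases Nat.lt_or_ge i s.length with h' | h'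
          · exact h'
          · exfalso; have : i = s.length := by omega
            subst this; exact hstop h
        have harg_k : (k0 - cDel c (i-1)) - (cDel c i - cDel c (i-1)) = k0 - cDel c ((i+1)-1) := by
          have : cDel c ((i+1)-1) = cDel c i := by norm_num
          rw [this]; ring
        have harg_i : (i : Int) + 1 = ((i+1 : Nat) : Int) := by push_cast; ring
        have harg_d :
            ((PySem.List.pyGetD s (i : Int) (0,0)).2 - (PySem.List.pyGetD s ((i : Int) - 1) (0,0)).2)
              * ((s.length : Int) - (i : Int)) = cDel c (i+1) - cDel c i := by
          have hi1 : ((i : Int) - 1) = ((i - 1 : Nat) : Int) := by omega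
          have e1 : PySem.List.pyGetD s (i : Int) (0,0) = s[i]'(by omega) := by
            rw [PySem.List.pyGetD_natCast, List.getD_eq_getElem _ _ (by omega)]
          have e2 : PySem.List.pyGetD s ((i : Int) - 1) (0,0) = s[i-1]'(by omega) := by
            rw [hi1, PySem.List.pyGetD_natCast, List.getD_eq_getElem _ _ (by omega)]
          have hcd1 : cDel c (i+1) = c.getD i 0 := by unfold cDel; norm_num
          have hsum : ((s.map (fun p => p.2)).take (i + 1)).sum
              = ((s.map (fun p => p.2)).take ((i-1) + 1)).sum + (s.map (fun p => p.2)).getD i 0 := by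
            have : (i-1) + 1 = i := by omega
            rw [this, List.getD_eq_getElem _ _ (by simp; omega), List.sum_take_succ _ _ (by simp; omega)]
          have gmi : (s.map (fun p => p.2)).getD i 0 = (s[i]'(by omega)).2 := by
            rw [List.getD_eq_getElem _ _ (by simp; omega)]; simp
          have gmi1 : (s.map (fun p => p.2)).getD (i-1) 0 = (s[i-1]'(by omega)).2 := by
            rw [List.getD_eq_getElem _ _ (by simp; omega)]; simp
          rw [hcd1, hcdi, e1, e2, hc, cums_getD s i (by omega), cums_getD s (i-1) (by omega),
              hsum, gmi, gmi1]
          have : ((i - 1 : Nat) : Int) = (i : Int) - 1 := by omega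
          rw [this]; ring
        rw [harg_k, harg_i, harg_d]
        have : cDel c (i+1) - cDel c i
            = cDel c (i+1) - cDel c ((i+1)-1) := by norm_num
        rw [this]
        exact ih (i+1) (by omega) (by omega) (by omega)
          (fun j hj => by
            rcases Nat.lt_or_ge j (i-1) with h' | h'
            · exact hprev j h'
            · have : j = i - 1 := by omega
              subst this; exact h)
      · have hcond : ¬ (cDel c i - cDel c (i-1) < k0 - cDel c (i-1)) := by rw [hcdi]; omega
        rw [if_neg hcond]
        have hm : c.countP (fun x => decide (x < k0)) = i - 1 :=
          countP_threshold c k0 (i-1) (by omega) (by rw [hclen]; exact hmono) hprev h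
        rw [hm]
        have : ((i - 1 : Nat) : Int) + 1 = (i : Int) := by omega
        rw [this]

theorem foldA (ft : List Int) :
    (PySem.List.pyRange 0 (PySem.List.len ft) 1).foldl
        (fun (st : List (Int × Int) × Int) i =>
          (st.1 ++ [(i, PySem.List.pyGetD ft i 0)], st.2 + PySem.List.pyGetD ft i 0)) ([], 0)
      = (PySem.List.enumerate ft 0, ft.sum) := by
  rw [PySem.List.foldl_prod_mk (f := fun l i => l ++ [(i, PySem.List.pyGetD ft i 0)])
      (g := fun t i => t + PySem.List.pyGetD ft i 0)]
  refine Prod.ext ?_ ?_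
  · show (PySem.List.pyRange 0 (PySem.List.len ft) 1).foldl
        (fun l i => l ++ [(i, PySem.List.pyGetD ft i 0)]) [] = PySem.List.enumerate ft 0
    rw [PySem.List.foldl_append_singleton_eq_map]
    rw [PySem.List.enumerate_eq_map_pyRange (d := 0)]
    simp
  · show (PySem.List.pyRange 0 (PySem.List.len ft) 1).foldl
        (fun t i => t + PySem.List.pyGetD ft i 0) 0 = ft.sum
    rw [PySem.List.len_eq, PySem.List.foldl_pyRange_zero_pyGetD' ft 0 (fun t x => t + x) 0]
    exact (List.sum_eq_foldl (l := ft)).symm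

theorem sorted_map_fst (xs : List (Int × Int)) :
    PySem.List.sorted (xs.map (fun p => p.1)) (fun x => x) false
      = (PySem.List.sorted xs (fun p => p.1) false).map (fun p => p.1) := by
  exact PySem.List.sorted_id_eq_of_perm_of_pairwise _ _
    ((PySem.List.sorted_perm xs (fun p => p.1) false).map _)
    (PySem.List.sorted_map_key_pairwise xs (fun p => p.1))

theorem solution_spec : Claim_equal_solution := by
  intro ft k0 hdom hpre
  unfold Spec_solution
  simp only [solution, solution_alt, foldA]
  by_cases hle : ft.sum ≤ k0
  · rw [if_pos hle, if_pos hle]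
  · rw [if_neg hle, if_neg hle]
    have hne : ft ≠ [] := by
      intro h; subst h; simp at hle
      rcases hpre with h | h
      · exact h rfl
      · exact absurd h (by omega)
    have hftlen : 1 ≤ ft.length := List.length_pos_iff.2 hne
    set s := PySem.List.sorted (PySem.List.enumerate ft) (fun x => x.2) with hs
    have hsl : s.length = ft.length := by
      rw [hs, PySem.List.length_sorted, PySem.List.length_enumerate]
    have hslen1 : 1 ≤ s.length := by omega
    have hlenft : PySem.List.len ft = (s.length : Int) := by rw [PySem.List.len_eq, hsl]
    rw [foldB]
    rw [hlenft]
    simp only [PySem.List.len_eq]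
    set c := cumsAux (s.length : Int) s 0 0 with hc
    have hclen : c.length = s.length := by rw [hc, cumsAux_length]
    set m := c.countP (fun x => decide (x < k0)) with hm
    have hpair : (s.map (fun p => p.2)).Pairwise (· ≤ ·) :=
      PySem.List.sorted_map_key_pairwise (PySem.List.enumerate ft) (fun x => x.2)
    have hts_sum : (s.map (fun p => p.2)).sum = ft.sum := by
      have hperm := PySem.List.sorted_perm (PySem.List.enumerate ft) (fun x => x.2) false
      rw [List.Perm.sum_eq (hperm.map (fun p => p.2)), PySem.List.map_snd_enumerate]
    have hlast : c.getD (s.length - 1) 0 = ft.sum := by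
      rw [hc, cums_getD s (s.length - 1) (by omega)]
      have h1 : s.length - 1 + 1 = s.length := by omega
      rw [h1]
      have h2 : (s.map (fun p => p.2)).take s.length = s.map (fun p => p.2) := by
        apply List.take_of_length_le; simp
      have h3 : ((s.length : Int) - 1 - ((s.length - 1 : Nat) : Int)) = 0 := by omega
      rw [h2, hts_sum, h3]
      ring
    have hstop : ¬ c.getD (s.length - 1) 0 < k0 := by rw [hlast]; omega
    have hdelt : cDel c 1 - cDel c 0 = (PySem.List.pyGetD s 0 (0, 0)).2 * (s.length : Int) := by
      have h0 : (0:Nat) < s.length := by omega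
      have e : cDel c 1 - cDel c 0 = c.getD 0 0 := by
        show (if (1:Nat) = 0 then (0:Int) else c.getD (1-1) 0)
            - (if (0:Nat) = 0 then (0:Int) else c.getD (0-1) 0) = c.getD 0 0
        rw [if_neg (by omega), if_pos rfl, sub_zero]
      rw [e, hc, cums_getD s 0 h0]
      have h1 : ((s.map (fun p => p.2)).take (0 + 1)).sum
          = ((s.map (fun p => p.2)).take 0).sum + (s.map (fun p => p.2))[0]'(by simp; omega) := by
        exact List.sum_take_succ _ 0 (by simp; omega)
      rw [h1]
      rw [List.getD_eq_getElem _ _ (by simp; omega)]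
      rw [PySem.List.pyGetD_zero, List.getD_eq_getElem _ _ h0]
      simp only [List.getElem_map, List.take_zero, List.sum_nil]
      ring
    have hloop : solutionLoopA s (s.length : Int) s.length k0
        ((PySem.List.pyGetD s 0 (0, 0)).2 * (s.length : Int)) 1
        = (k0 - cDel c m, (m : Int) + 1) := by
      have h := loopA_spec s k0 (by rw [← hc] at *; exact cums_mono s hpair) (by rw [← hc]; exact hstop)
        s.length 1 (by omega) (by omega) (by omega) (fun j hj => absurd hj (by omega))
      rw [← hc] at h
      have e1 : k0 - cDel c 0 = k0 := by unfold cDel; norm_num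
      rw [e1, hdelt, Nat.cast_one, ← hm] at h
      exact h
    rw [hloop]
    simp only [List.nil_append, ← hm, add_sub_cancel_right]
    rw [PySem.List.slice_from_natCast]
    have hm_le : m ≤ s.length := by rw [hm, ← hclen]; exact List.countP_le_length
    have hmlt : m < s.length := by
      rcases Nat.lt_or_ge m s.length with h' | h'
      · exact h'
      · exfalso
        have hmeq : m = c.length := by omega
        have hall : ∀ x ∈ c, (fun x => decide (x < k0)) x = true :=
          List.countP_eq_length.1 (by rw [← hm, hmeq])
        have hx : c.getD (s.length - 1) 0 ∈ c := by
          rw [List.getD_eq_getElem _ _ (by omega)]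
          exact List.getElem_mem _
        have := hall _ hx
        simp only [decide_eq_true_eq] at this
        exact hstop this
    have hrem : (if 0 < (m:Int) then PySem.List.pyGetD c ((m:Int) - 1) 0 else 0) = cDel c m := by
      by_cases hm0 : m = 0
      · rw [hm0, if_neg (by omega)]; unfold cDel; rw [if_pos rfl]
      · rw [if_pos (by omega)]
        have : ((m:Int) - 1) = ((m - 1 : Nat) : Int) := by omega
        rw [this, PySem.List.pyGetD_natCast]
        unfold cDel
        rw [if_neg hm0]
    rw [hrem, sorted_map_fst]
    rw [PySem.List.length_sorted, List.length_drop]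
    have hmodeq : ((s.length : Int) - (m : Int)) = ((s.length - m : Nat) : Int) := by omega
    rw [hmodeq]
    have hmodpos : (0:Int) < ((s.length - m : Nat) : Int) := by
      have : 0 < s.length - m := by omega
      exact_mod_cast this
    set idx := PySem.Int.mod (k0 - cDel c m) ((s.length - m : Nat) : Int) with hidx
    have h0i : 0 ≤ idx := PySem.Int.mod_nonneg _ hmodpos
    have h1i : idx < ((s.length - m : Nat) : Int) := PySem.Int.mod_lt _ hmodpos
    have hSAlen : (PySem.List.sorted (List.drop m s) (fun x => x.1)).length = s.length - m := by
      rw [PySem.List.length_sorted, List.length_drop]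
    rw [PySem.List.pyGetD_eq_getElem _ _ h0i (by rw [hSAlen]; exact h1i)]
    rw [PySem.List.pyGetD_eq_getElem _ _ h0i (by rw [List.length_map, hSAlen]; exact h1i)]
    rw [List.getElem_map]
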